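-- pv_equiv track=rewrite | github.com/prasadgganthade/Python_projects | Check_digit_divide_num.py | check_if_all_digit_divide_num
-- ===== SOURCE A (Python) =====
-- def check_if_all_digit_divide_num(num):
--     temp = num
--
--     while temp > 0:
--         if temp % 10 == 0:
--             return 'No'
--         else:
--             last_digit = temp % 10
--             if num % last_digit == 0:
--                 temp //= 10
--                 continue
--             else:
--                 return 'No'
--     return 'Yes'
-- ===== SOURCE B (Python) =====
-- def check_if_all_digit_divide_num(num):
--     if num <= 0:
--         return 'Yes'
--     for ch in str(num):
--         d = ord(ch) - ord('0')
--         if d == 0 or num % d != 0: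
--             return 'No'
--     return 'Yes'
-- ===== Notes on version B (the rewrite author's own statement) =====
-- stated objective: idiomatic
-- what changed: B guards num <= 0 and then scans the decimal string of num most-significant-digit-first, converting characters to digits, instead of peeling digits least-significant-first with %10 and //10 in a while loop.
import Mathlib
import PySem

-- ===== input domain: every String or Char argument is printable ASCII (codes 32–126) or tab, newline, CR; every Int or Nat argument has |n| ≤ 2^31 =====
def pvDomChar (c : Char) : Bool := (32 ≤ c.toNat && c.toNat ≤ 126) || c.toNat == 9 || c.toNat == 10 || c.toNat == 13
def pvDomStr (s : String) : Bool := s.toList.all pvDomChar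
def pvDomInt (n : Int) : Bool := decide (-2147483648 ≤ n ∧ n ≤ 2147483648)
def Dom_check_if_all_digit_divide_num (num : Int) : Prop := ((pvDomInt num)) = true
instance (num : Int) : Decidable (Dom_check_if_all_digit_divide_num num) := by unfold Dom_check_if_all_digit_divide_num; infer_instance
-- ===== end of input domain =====

-- B replaces A's least-significant-first %10///10 while-loop by a scan over the decimal
-- string of num (idiomatic, same cost); return value only, neither mutates anything.

-- ===== PORT A =====
-- A's while-loop over temp, peeling the last digit each iteration.
def pvALoop (num temp : Int) : String :=
  if _h : temp > 0 then
    if PySem.Int.mod temp 10 = 0 then "No"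
    else
      -- last_digit = temp % 10
      if PySem.Int.mod num (PySem.Int.mod temp 10) = 0 then
        pvALoop num (PySem.Int.floordiv temp 10)
      else "No"
  else "Yes"
  termination_by temp.toNat
  decreasing_by
    have h10 : PySem.Int.floordiv temp 10 = temp / 10 :=
      PySem.Int.floordiv_eq_ediv_of_pos (by norm_num)
    rw [h10]; omega

def check_if_all_digit_divide_num (num : Int) : String :=
  pvALoop num num

-- ===== PORT B =====
-- B's for-loop over the characters of str(num), most significant digit first.
def pvBLoop (num : Int) (cs : List Char) : String :=
  match cs with
  | [] => "Yes"
  | c :: rest =>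
    let d : Int := (c.toNat : Int) - 48   -- ord(ch) - ord('0')
    if d = 0 ∨ PySem.Int.mod num d ≠ 0 then "No"
    else pvBLoop num rest

def check_if_all_digit_divide_num_alt (num : Int) : String :=
  if num ≤ 0 then "Yes"
  else pvBLoop num (PySem.Int.toStr num).toList

-- ===== PRECONDITION & SPEC =====
def Spec_check_if_all_digit_divide_num (num : Int) (out : String) : Prop := out = check_if_all_digit_divide_num_alt num
instance (num : Int) (out : String) : Decidable (Spec_check_if_all_digit_divide_num num out) := by unfold Spec_check_if_all_digit_divide_num; infer_instance

-- ===== CLAIM (what is proved, stated in full; the proofs are below) =====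
def Claim_equal_check_if_all_digit_divide_num : Prop := ∀ (num : Int), Dom_check_if_all_digit_divide_num num → Spec_check_if_all_digit_divide_num num (check_if_all_digit_divide_num num)

-- ===== LEMMAS AND PROOFS =====

-- the common yardstick: every base-10 digit d of n is nonzero and divides num
def pvGood (num : Int) (d : Nat) : Bool := decide (d ≠ 0) && decide ((d : Int) ∣ num)

theorem pvALoop_char (num temp : Int) :
    pvALoop num temp =
      (if (Nat.digits 10 temp.toNat).all (pvGood num) then "Yes" else "No") := by
  by_cases h : temp > 0
  · have hlt : (temp / 10).toNat < temp.toNat := by omega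
    have ih := pvALoop_char num (temp / 10)
    rw [pvALoop]
    have h10 : PySem.Int.floordiv temp 10 = temp / 10 :=
      PySem.Int.floordiv_eq_ediv_of_pos (by norm_num)
    have hm : PySem.Int.mod temp 10 = temp % 10 :=
      PySem.Int.mod_eq_emod_of_pos (by norm_num)
    have hdig : Nat.digits 10 temp.toNat = temp.toNat % 10 :: Nat.digits 10 (temp.toNat / 10) :=
      Nat.digits_def' (by norm_num) (by omega)
    have htn : ((temp.toNat % 10 : Nat) : Int) = temp % 10 := by
      push_cast; omega
    have htq : (temp / 10).toNat = temp.toNat / 10 := by omega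
    rw [hdig, List.all_cons]
    simp only [h, dif_pos, h10, hm, ih, htq, pvGood]
    by_cases hz : temp % 10 = 0
    · have : temp.toNat % 10 = 0 := by omega
      simp [hz, this]
    · have hnz : temp.toNat % 10 ≠ 0 := by omega
      rw [if_neg hz]
      have hmaxt : max temp 0 = temp := max_eq_left (le_of_lt h)
      by_cases hdvd : ((temp.toNat % 10 : Nat) : Int) ∣ num
      · have hmod : PySem.Int.mod num (temp % 10) = 0 := by
          rw [← htn, PySem.Int.mod_eq_zero_iff_dvd]; exact hdvd
        have hdvd2 : temp % 10 ∣ num := htn ▸ hdvd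
        simp [hmod, hnz, hdvd2, hmaxt]
      · have hmod : PySem.Int.mod num (temp % 10) ≠ 0 := by
          rw [← htn, Ne, PySem.Int.mod_eq_zero_iff_dvd]; exact hdvd
        have hdvd2 : ¬ temp % 10 ∣ num := htn ▸ hdvd
        simp [hmod, hnz, hdvd2, hmaxt]
  · rw [pvALoop]
    have : temp.toNat = 0 := by omega
    simp [h, this]
  termination_by temp.toNat

theorem pvBLoop_char (num : Int) (cs : List Char) :
    pvBLoop num cs =
      (if cs.all (fun c => decide (((c.toNat : Int) - 48 ≠ 0) ∧ PySem.Int.mod num ((c.toNat : Int) - 48) = 0)) then "Yes" else "No") := by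
  induction cs with
  | nil => simp [pvBLoop]
  | cons c rest ih =>
    rw [pvBLoop, List.all_cons, ih]
    by_cases h1 : ((c.toNat : Int) - 48 = 0) ∨ PySem.Int.mod num ((c.toNat : Int) - 48) ≠ 0
    · simp only [if_pos h1]
      have : ¬ (((c.toNat : Int) - 48 ≠ 0) ∧ PySem.Int.mod num ((c.toNat : Int) - 48) = 0) := by tauto
      simp [this]
    · simp only [if_neg h1]
      have : (((c.toNat : Int) - 48 ≠ 0) ∧ PySem.Int.mod num ((c.toNat : Int) - 48) = 0) := by tauto
      simp [this]

-- (Nat.digitChar d).toNat = d + 48 for decimal digits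
theorem pvDigitChar_toNat (d : Nat) (h : d < 10) : (Nat.digitChar d).toNat = d + 48 := by
  interval_cases d <;> decide

theorem pvAll_congr_mem {α : Type} (l : List α) (p q : α → Bool)
    (h : ∀ a ∈ l, p a = q a) : l.all p = l.all q := by
  induction l with
  | nil => rfl
  | cons a t ih => simp_all [List.all_cons]

-- B's per-character test on digitChar d agrees with pvGood d for a decimal digit d
theorem pvElem (num : Int) (d : Nat) (hlt : d < 10) :
    ((fun c => decide (((c.toNat : Int) - 48 ≠ 0) ∧ PySem.Int.mod num ((c.toNat : Int) - 48) = 0)) ∘ Nat.digitChar) d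
      = pvGood num d := by
  have htn : (Nat.digitChar d).toNat = d + 48 := pvDigitChar_toNat d hlt
  have hsub : ((Nat.digitChar d).toNat : Int) - 48 = (d : Int) := by
    rw [htn]; push_cast; ring
  simp only [Function.comp, hsub, pvGood]
  by_cases hz : d = 0
  · simp [hz]
  · have hdz : (d : Int) ≠ 0 := by exact_mod_cast hz
    by_cases hdvd : (d : Int) ∣ num
    · have : PySem.Int.mod num (d : Int) = 0 := (PySem.Int.mod_eq_zero_iff_dvd num d).mpr hdvd
      simp [this, hz, hdvd]
    · have : PySem.Int.mod num (d : Int) ≠ 0 := by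
        rw [Ne, PySem.Int.mod_eq_zero_iff_dvd]; exact hdvd
      simp [this, hz, hdvd]

-- Nat.toDigits 10 n lists the base-10 digits MSB-first (n > 0)
theorem pvToDigitsCore_eq (f : Nat) : ∀ (n : Nat) (acc : List Char), 0 < n → n < f →
    Nat.toDigitsCore 10 f n acc = ((Nat.digits 10 n).map Nat.digitChar).reverse ++ acc := by
  induction f with
  | zero => intro n acc h1 h2; omega
  | succ f ih =>
    intro n acc h1 h2
    rw [Nat.toDigitsCore]
    have hdig : Nat.digits 10 n = n % 10 :: Nat.digits 10 (n / 10) :=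
      Nat.digits_def' (by norm_num) h1
    by_cases hq : n / 10 = 0
    · simp [hq, hdig, Nat.digits_zero]
    · rw [if_neg hq, ih (n / 10) _ (by omega) (by omega), hdig]
      simp

theorem pvToDigits_eq (n : Nat) (h : 0 < n) :
    Nat.toDigits 10 n = ((Nat.digits 10 n).map Nat.digitChar).reverse := by
  rw [Nat.toDigits, pvToDigitsCore_eq (n + 1) n [] h (by omega)]
  simp

-- ===== VERDICT (by name: the statement is the Claim_ definition above) =====
theorem pvMain (num : Int) :
    check_if_all_digit_divide_num num = check_if_all_digit_divide_num_alt num := by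
  unfold check_if_all_digit_divide_num check_if_all_digit_divide_num_alt
  by_cases hle : num ≤ 0
  · have h0 : num.toNat = 0 := by omega
    rw [if_pos hle, pvALoop_char, h0]
    simp
  · rw [if_neg hle, pvALoop_char, pvBLoop_char]
    have hpos : 0 < num := by omega
    have hchars : (PySem.Int.toStr num).toList = Nat.toDigits 10 num.toNat := by
      rw [PySem.Int.toList_toStr, PySem.Int.toChars, if_neg (by omega)]
    rw [hchars, pvToDigits_eq num.toNat (by omega), List.all_reverse, List.all_map]
    have hcond : (Nat.digits 10 num.toNat).all
        ((fun c => decide (((c.toNat : Int) - 48 ≠ 0) ∧ PySem.Int.mod num ((c.toNat : Int) - 48) = 0)) ∘ Nat.digitChar)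
        = (Nat.digits 10 num.toNat).all (pvGood num) :=
      pvAll_congr_mem _ _ _ (fun d hd => pvElem num d (Nat.digits_lt_base (by norm_num) hd))
    rw [hcond]

theorem check_if_all_digit_divide_num_spec : Claim_equal_check_if_all_digit_divide_num := by
  intro num _
  unfold Spec_check_if_all_digit_divide_num
  exact pvMain num
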